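-- pv_equiv track=rewrite | github.com/Kruziikloksu/simple-custom-dg-lab-server | src/pulse_section.py | _group_by_four_with_padding
-- ===== SOURCE A (Python) =====
-- def _group_by_four_with_padding(arr):
--     result = []
--     for i in range(0, len(arr), 4):
--         group = arr[i:i+4]
--         if len(group) < 4:
--             group += [0] * (4 - len(group))
--         result.append(group)
--     return result
-- ===== SOURCE B (Python) =====
-- def _group_by_four_with_padding(arr):
--     # Single element-wise pass with a running chunk accumulator (no index slicing).
--     result = []
--     cur = []
--     for x in arr:
--         cur = cur + [x]
--         if len(cur) == 4:
--             result.append(cur)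
--             cur = []
--     if cur:
--         result.append(cur + [0] * (4 - len(cur)))
--     return result
-- ===== Notes on version B (the rewrite author's own statement) =====
-- stated objective: alternative
-- what changed: Replaces the index-stride loop with slicing and a per-group length check by a single element-wise traversal maintaining a current-chunk accumulator that is flushed at length four and zero-padded once after the loop.
import Mathlib
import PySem

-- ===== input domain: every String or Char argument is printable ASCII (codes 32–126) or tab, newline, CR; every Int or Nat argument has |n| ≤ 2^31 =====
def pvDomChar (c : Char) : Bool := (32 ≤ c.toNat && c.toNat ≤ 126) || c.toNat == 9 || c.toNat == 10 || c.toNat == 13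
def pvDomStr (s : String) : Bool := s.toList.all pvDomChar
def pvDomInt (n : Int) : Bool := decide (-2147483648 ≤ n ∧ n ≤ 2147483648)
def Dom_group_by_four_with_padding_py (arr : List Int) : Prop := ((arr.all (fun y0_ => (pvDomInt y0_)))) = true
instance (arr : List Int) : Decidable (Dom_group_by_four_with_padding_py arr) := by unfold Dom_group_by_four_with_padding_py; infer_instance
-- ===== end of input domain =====

-- B replaces A's index-stride loop (slice each group of four, pad short ones) by a single
-- element-wise traversal with a current-chunk accumulator flushed at length four and
-- zero-padded once after the loop; alternative decomposition, same cost.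


-- ===== PORT A =====
def group_by_four_with_padding_py (arr : List Int) : List (List Int) :=
  (PySem.List.pyRange 0 arr.length 4).foldl
    (fun result i =>
      let group := PySem.List.slice arr (some i) (some (i + 4))
      let group := if group.length < 4 then group ++ List.replicate (4 - group.length) (0 : Int) else group
      result ++ [group])
    []

-- ===== PORT B =====
def pvAltGo (cur : List Int) : List Int → List (List Int)
  | [] => if cur.isEmpty then [] else [cur ++ List.replicate (4 - cur.length) 0]
  | x :: xs =>
      if (cur ++ [x]).length = 4 then (cur ++ [x]) :: pvAltGo [] xs
      else pvAltGo (cur ++ [x]) xs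

def group_by_four_with_padding_py_alt (arr : List Int) : List (List Int) :=
  pvAltGo [] arr

-- ===== PRECONDITION & SPEC =====
def Spec_group_by_four_with_padding_py (arr : List Int) (out : List (List Int)) : Prop := out = group_by_four_with_padding_py_alt arr
instance (arr : List Int) (out : List (List Int)) : Decidable (Spec_group_by_four_with_padding_py arr out) := by unfold Spec_group_by_four_with_padding_py; infer_instance

-- ===== CLAIM (what is proved, stated in full; the proofs are below) =====
def Claim_equal_group_by_four_with_padding_py : Prop := ∀ (arr : List Int), Dom_group_by_four_with_padding_py arr → Spec_group_by_four_with_padding_py arr (group_by_four_with_padding_py arr)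

-- ===== LEMMAS AND PROOFS =====

-- Common closed form both ports are reduced to: the zero-padded k-th window of four.
def pvPad (g : List Int) : List Int :=
  if g.length < 4 then g ++ List.replicate (4 - g.length) (0 : Int) else g

def pvChunkF (arr : List Int) : List (List Int) :=
  (List.range ((arr.length + 3) / 4)).map (fun k => pvPad ((arr.drop (4 * k)).take 4))

lemma A_closed (arr : List Int) : group_by_four_with_padding_py arr = pvChunkF arr := by
  unfold group_by_four_with_padding_py pvChunkF
  rw [PySem.List.pyRange_of_pos 0 (arr.length : Int) (by norm_num), List.foldl_map]
  refine (PySem.List.foldl_append_singleton_eq_map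
    (fun k : Nat => pvPad (PySem.List.slice arr (some (0 + 4 * (k:Int))) (some (0 + 4 * (k:Int) + 4)))) _ []).trans ?_
  rw [List.nil_append]
  have hm : (if (0:Int) < (arr.length : Int) then (((arr.length : Int) - 0 + 4 - 1) / 4).toNat else 0)
      = (arr.length + 3) / 4 := by split_ifs with h <;> omega
  rw [hm]
  refine List.map_congr_left ?_
  intro k _
  have h3 := PySem.List.slice_natCast_add arr (4*k) 4
  push_cast at h3
  rw [show (0:Int) + 4 * (k:Int) = 4 * (k:Int) from by ring, h3]

lemma B_closed_aux : ∀ (n : Nat) (arr : List Int), arr.length ≤ n → pvAltGo [] arr = pvChunkF arr := by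
  intro n
  induction n with
  | zero =>
    intro arr h
    have : arr = [] := by cases arr <;> simp_all
    subst this; decide
  | succ n ih =>
    intro arr h
    match arr with
    | [] => decide
    | [a] => simp [pvAltGo, pvChunkF, pvPad, List.range_succ]
    | [a, b] => simp [pvAltGo, pvChunkF, pvPad, List.range_succ]
    | [a, b, c] => simp [pvAltGo, pvChunkF, pvPad, List.range_succ]
    | a :: b :: c :: d :: rest =>
      have hr : rest.length ≤ n := by simp at h; omega
      have hL : pvAltGo [] (a :: b :: c :: d :: rest) = [a, b, c, d] :: pvAltGo [] rest := by
        simp [pvAltGo]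
      rw [hL, ih rest hr]
      unfold pvChunkF
      have hlen : (a :: b :: c :: d :: rest).length = rest.length + 4 := by simp
      rw [hlen, show (rest.length + 4 + 3) / 4 = (rest.length + 3) / 4 + 1 from by omega,
        List.range_succ_eq_map]
      simp only [List.map_cons, List.map_map]
      refine congrArg₂ List.cons ?_ ?_
      · simp [pvPad]
      · refine List.map_congr_left ?_
        intro k _
        simp only [Function.comp]
        have hd : List.drop (4 * (k + 1)) (a :: b :: c :: d :: rest) = List.drop (4 * k) rest := by
          rw [show 4 * (k + 1) = 4 * k + 4 from by ring]
          simp [List.drop]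
        rw [hd]

theorem pv_main (arr : List Int) : group_by_four_with_padding_py arr = group_by_four_with_padding_py_alt arr := by
  rw [A_closed, group_by_four_with_padding_py_alt, B_closed_aux arr.length arr le_rfl]

-- ===== VERDICT (by name: the statement is the Claim_ definition above) =====
theorem group_by_four_with_padding_py_spec : Claim_equal_group_by_four_with_padding_py := by
  intro arr _
  exact pv_main arr
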